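-- pv_equiv track=rewrite | github.com/yruns/3DVLMReasoning | src/benchmarks/embodiedscan_bbox_feasibility/observations.py | centered_frame_window
-- ===== SOURCE A (Python) =====
-- def centered_frame_window(center: int, available: list[int], size: int) -> list[int]:
--     if size <= 0:
--         raise ValueError("size must be positive")
--     if not available:
--         return []
--
--     ordered = sorted(int(frame_id) for frame_id in available)
--     if center in ordered:
--         center_idx = ordered.index(center)
--     else:
--         center_idx = min(range(len(ordered)), key=lambda idx: abs(ordered[idx] - center))
--
--     half = size // 2
--     start = max(0, center_idx - half)
--     end = min(len(ordered), start + size)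
--     start = max(0, end - size)
--     return ordered[start:end]
-- ===== SOURCE B (Python) =====
-- from bisect import bisect_left
--
--
-- def centered_frame_window(center: int, available: list[int], size: int) -> list[int]:
--     if size <= 0:
--         raise ValueError("size must be positive")
--     if not available:
--         return []
--
--     ordered = sorted(available)
--     n = len(ordered)
--
--     # Pick the frame value nearest to the center (ties go to the smaller value),
--     # then take the first index holding that value.
--     i = bisect_left(ordered, center)
--     if i == n:
--         nearest = ordered[-1]
--     elif i == 0:
--         nearest = ordered[0]
--     elif center - ordered[i - 1] <= ordered[i] - center:
--         nearest = ordered[i - 1]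
--     else:
--         nearest = ordered[i]
--     idx = bisect_left(ordered, nearest)
--
--     half = size // 2
--     start = max(0, idx - half)
--     end = min(n, start + size)
--     start = max(0, end - size)
--     return ordered[start:end]
-- ===== Notes on version B (the rewrite author's own statement) =====
-- stated objective: alternative
-- what changed: B locates the nearest frame VALUE from the bisect_left insertion point by comparing at most the two neighbouring values and then takes that value's first index with a second bisect_left, replacing A's membership test, first-occurrence .index scan and linear argmin over per-index distances; Pre_ excludes size <= 0, where A raises ValueError.
import Mathlib
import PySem

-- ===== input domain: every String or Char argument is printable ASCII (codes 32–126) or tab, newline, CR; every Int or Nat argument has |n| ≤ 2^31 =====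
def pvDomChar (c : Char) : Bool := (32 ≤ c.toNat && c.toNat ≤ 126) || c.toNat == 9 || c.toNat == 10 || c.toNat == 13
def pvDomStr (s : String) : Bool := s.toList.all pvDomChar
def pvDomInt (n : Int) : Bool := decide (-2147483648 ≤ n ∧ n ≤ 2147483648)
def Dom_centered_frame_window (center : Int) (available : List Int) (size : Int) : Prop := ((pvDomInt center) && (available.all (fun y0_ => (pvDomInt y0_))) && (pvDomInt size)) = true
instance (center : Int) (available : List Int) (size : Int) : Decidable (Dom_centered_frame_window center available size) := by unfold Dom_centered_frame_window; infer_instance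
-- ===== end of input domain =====

-- B picks the nearest frame VALUE via a bisect insertion point and two-neighbour comparison, then takes
-- that value's first index with bisect_left, replacing A's membership test + index scan + linear argmin
-- over all index distances (objective: alternative; same return value, proved below).


-- ===== PORT A =====
def centered_frame_window (center : Int) (available : List Int) (size : Int) : List Int :=
  if size ≤ 0 then []        -- Python raises ValueError here; excluded by Pre_
  else if available = [] then []
  else
    let ordered := PySem.List.sorted available (fun x => x) false
    let center_idx : Int :=
      if center ∈ ordered then ((PySem.List.index? ordered center).getD 0 : Nat)
      else (PySem.List.min? (PySem.List.pyRange 0 (ordered.length : Int) 1)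
              (fun idx => |PySem.List.pyGetD ordered idx 0 - center|)).getD 0
    let half := PySem.Int.floordiv size 2
    let start := max 0 (center_idx - half)
    let e := min (ordered.length : Int) (start + size)
    let start2 := max 0 (e - size)
    PySem.List.slice ordered (some start2) (some e)

-- ===== PORT B =====
-- bisect.bisect_left on a sorted list: the insertion point equals the number of elements
-- strictly below x (exact on sorted lists, the only way Source B calls it).
def pyBisectLeft (l : List Int) (x : Int) : Nat := l.countP (fun v => decide (v < x))

def centered_frame_window_alt (center : Int) (available : List Int) (size : Int) : List Int :=
  if size ≤ 0 then []        -- same ValueError; excluded by Pre_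
  else if available = [] then []
  else
    let ordered := PySem.List.sorted available (fun x => x) false
    let n := ordered.length
    let i := pyBisectLeft ordered center
    let nearest : Int :=
      if i = n then PySem.List.pyGetD ordered ((n : Int) - 1) 0
      else if i = 0 then PySem.List.pyGetD ordered 0 0
      else if center - PySem.List.pyGetD ordered ((i : Int) - 1) 0 ≤
              PySem.List.pyGetD ordered (i : Int) 0 - center then
        PySem.List.pyGetD ordered ((i : Int) - 1) 0
      else PySem.List.pyGetD ordered (i : Int) 0
    let idx : Int := (pyBisectLeft ordered nearest : Nat)
    let half := PySem.Int.floordiv size 2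
    let start := max 0 (idx - half)
    let e := min (n : Int) (start + size)
    let start2 := max 0 (e - size)
    PySem.List.slice ordered (some start2) (some e)

-- ===== PRECONDITION & SPEC =====
-- Pre_ excludes exactly size <= 0, where the Python A raises ValueError.
def Pre_centered_frame_window (center : Int) (available : List Int) (size : Int) : Prop := 0 < size
instance (center : Int) (available : List Int) (size : Int) : Decidable (Pre_centered_frame_window center available size) := by unfold Pre_centered_frame_window; infer_instance
def pvWitness_centered_frame_window : Int × List Int × Int := (2, [5, 1, 3], 2)

def Spec_centered_frame_window (center : Int) (available : List Int) (size : Int) (out : List Int) : Prop := out = centered_frame_window_alt center available size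
instance (center : Int) (available : List Int) (size : Int) (out : List Int) : Decidable (Spec_centered_frame_window center available size out) := by unfold Spec_centered_frame_window; infer_instance

-- ===== CLAIM (what is proved, stated in full; the proofs are below) =====
def Claim_equal_centered_frame_window : Prop := ∀ (center : Int) (available : List Int) (size : Int), Dom_centered_frame_window center available size → Pre_centered_frame_window center available size → Spec_centered_frame_window center available size (centered_frame_window center available size)

-- ===== LEMMAS AND PROOFS =====

lemma countP_sorted_lt_iff (l : List Int) (hs : l.Pairwise (· ≤ ·)) (c : Int)
    (j : Nat) (hj : j < l.length) :
    l[j] < c ↔ j < l.countP (fun v => decide (v < c)) := by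
  induction l generalizing j with
  | nil => simp at hj
  | cons x t ih =>
    rw [List.pairwise_cons] at hs
    by_cases hx : x < c
    · have hcnt : (x :: t).countP (fun v => decide (v < c)) = t.countP (fun v => decide (v < c)) + 1 := by
        simp [hx]
      cases j with
      | zero => simpa [hcnt] using hx
      | succ k =>
        simp only [List.getElem_cons_succ, hcnt]
        rw [ih hs.2 k (by simpa using hj)]
        omega
    · have hall : ∀ y ∈ t, ¬ y < c := by
        intro y hy
        have := hs.1 y hy
        omega
      have hcnt : (x :: t).countP (fun v => decide (v < c)) = 0 := by
        rw [List.countP_eq_zero]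
        intro y hy
        cases List.mem_cons.mp hy with
        | inl h => simp [h, hx]
        | inr h => simpa using hall y h
      rw [hcnt]
      constructor
      · intro h
        exfalso
        cases j with
        | zero => exact hx (by simpa using h)
        | succ k =>
          exact hall _ (List.getElem_mem _) (by simpa using h)
      · omega

lemma minFold_stay {κ : Type} [LinearOrder κ] (key : Int → κ) (f : Option Int → Int → Option Int)
    (hf_ge : ∀ a x, ¬ key x < key a → f (some a) x = some a)
    (l2 : List Int) (a : Int) (h : ∀ x ∈ l2, ¬ key x < key a) :
    l2.foldl f (some a) = some a := by
  induction l2 with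
  | nil => rfl
  | cons y t ih =>
    simp only [List.foldl_cons]
    rw [hf_ge a y (h y (List.mem_cons_self))]
    exact ih (fun x hx => h x (List.mem_cons_of_mem _ hx))

lemma minFold_mem {κ : Type} [LinearOrder κ] (key : Int → κ) (f : Option Int → Int → Option Int)
    (hf_lt : ∀ a x, key x < key a → f (some a) x = some x)
    (hf_ge : ∀ a x, ¬ key x < key a → f (some a) x = some a)
    (l : List Int) (a : Int) :
    ∃ b, l.foldl f (some a) = some b ∧ (b = a ∨ b ∈ l) := by
  induction l generalizing a with
  | nil => exact ⟨a, rfl, Or.inl rfl⟩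
  | cons y t ih =>
    simp only [List.foldl_cons]
    by_cases hy : key y < key a
    · rw [hf_lt a y hy]
      obtain ⟨b, hb, hmem⟩ := ih y
      exact ⟨b, hb, Or.inr (by rcases hmem with h | h <;> simp [h])⟩
    · rw [hf_ge a y hy]
      obtain ⟨b, hb, hmem⟩ := ih a
      exact ⟨b, hb, by rcases hmem with h | h <;> simp [h]⟩

lemma minFold_first {κ : Type} [LinearOrder κ] (key : Int → κ) (f : Option Int → Int → Option Int)
    (hf_none : ∀ x, f none x = some x)
    (hf_lt : ∀ a x, key x < key a → f (some a) x = some x)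
    (hf_ge : ∀ a x, ¬ key x < key a → f (some a) x = some a)
    (n t : Nat) (ht : t < n)
    (H1 : ∀ j : Int, 0 ≤ j → j < (t : Int) → key t < key j)
    (H2 : ∀ j : Int, (t : Int) ≤ j → j < (n : Int) → key t ≤ key j) :
    (PySem.List.pyRange 0 (n : Int) 1).foldl f none = some (t : Int) := by
  have hsplit : PySem.List.pyRange 0 (n : Int) 1 =
      PySem.List.pyRange 0 (t : Int) 1 ++ PySem.List.pyRange (t : Int) (n : Int) 1 :=
    PySem.List.pyRange_one_append 0 (t : Int) (n : Int) (by positivity) (by exact_mod_cast ht.le)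
  have hcons : PySem.List.pyRange (t : Int) (n : Int) 1 =
      (t : Int) :: PySem.List.pyRange ((t : Int) + 1) (n : Int) 1 :=
    PySem.List.pyRange_one_cons (by exact_mod_cast ht)
  have hstay : ∀ x ∈ PySem.List.pyRange ((t : Int) + 1) (n : Int) 1, ¬ key x < key (t : Int) := by
    intro x hx
    rw [PySem.List.mem_pyRange_one] at hx
    exact not_lt.mpr (H2 x (by omega) hx.2)
  rw [hsplit, List.foldl_append, hcons]
  rcases Nat.eq_zero_or_pos t with h0 | hpos
  · subst h0
    rw [PySem.List.pyRange_one_eq_nil (by simp)]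
    simp only [List.foldl_nil, List.foldl_cons, hf_none]
    exact minFold_stay key f hf_ge _ _ (by exact_mod_cast hstay)
  · have hc0 : PySem.List.pyRange 0 (t : Int) 1 = 0 :: PySem.List.pyRange 1 (t : Int) 1 :=
      PySem.List.pyRange_one_cons (by exact_mod_cast hpos)
    rw [hc0]
    simp only [List.foldl_cons, hf_none]
    obtain ⟨b, hb, hmem⟩ := minFold_mem key f hf_lt hf_ge (PySem.List.pyRange 1 (t : Int) 1) 0
    rw [hb]
    have hbr : 0 ≤ b ∧ b < (t : Int) := by
      rcases hmem with h | h
      · subst h; constructor <;> [omega; exact_mod_cast hpos]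
      · rw [PySem.List.mem_pyRange_one] at h; omega
    rw [hf_lt b (t : Int) (H1 b hbr.1 hbr.2)]
    exact minFold_stay key f hf_ge _ _ hstay

lemma min?_pyRange_first {κ : Type} [LinearOrder κ] (key : Int → κ) (n t : Nat) (ht : t < n)
    (H1 : ∀ j : Int, 0 ≤ j → j < (t : Int) → key t < key j)
    (H2 : ∀ j : Int, (t : Int) ≤ j → j < (n : Int) → key t ≤ key j) :
    PySem.List.min? (PySem.List.pyRange 0 (n : Int) 1) key = some (t : Int) := by
  show (PySem.List.pyRange 0 (n : Int) 1).foldl _ none = some (t : Int)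
  apply minFold_first key _ _ _ _ n t ht H1 H2
  · intro x; rfl
  · intro a x h
    show (if key x < key a then some x else some a) = some x
    rw [if_pos h]
  · intro a x h
    show (if key x < key a then some x else some a) = some a
    rw [if_neg h]

lemma idx_eq (c : Int) (l : List Int) (hs : l.Pairwise (· ≤ ·)) (hne : l ≠ []) :
    (if c ∈ l then (((PySem.List.index? l c).getD 0 : Nat) : Int)
     else (PySem.List.min? (PySem.List.pyRange 0 (l.length : Int) 1)
             (fun idx => |PySem.List.pyGetD l idx 0 - c|)).getD 0) =
    ((pyBisectLeft l
        (if pyBisectLeft l c = l.length then PySem.List.pyGetD l ((l.length : Int) - 1) 0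
         else if pyBisectLeft l c = 0 then PySem.List.pyGetD l 0 0
         else if c - PySem.List.pyGetD l ((pyBisectLeft l c : Int) - 1) 0 ≤
                 PySem.List.pyGetD l (pyBisectLeft l c : Int) 0 - c then
           PySem.List.pyGetD l ((pyBisectLeft l c : Int) - 1) 0
         else PySem.List.pyGetD l (pyBisectLeft l c : Int) 0) : Nat) : Int) := by
  set n := l.length with hn
  set i := l.countP (fun v => decide (v < c)) with hi
  have hile : i ≤ n := List.countP_le_length
  have hiff : ∀ j (hj : j < n), l[j] < c ↔ j < i := fun j hj => countP_sorted_lt_iff l hs c j hj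
  have hmono : ∀ p q (hq : q < n) (hpq : p ≤ q), l[p]'(lt_of_le_of_lt hpq hq) ≤ l[q] := by
    intro p q hq hpq
    rcases eq_or_lt_of_le hpq with rfl | h
    · exact le_refl _
    · exact List.pairwise_iff_getElem.mp hs p q _ hq h
  have hget : ∀ (j : Nat) (hj : j < n), PySem.List.pyGetD l (j : Int) 0 = l[j] := by
    intro j hj
    rw [PySem.List.pyGetD_eq_getElem l 0 (by positivity) (by exact_mod_cast hj)]
    simp
  -- first index of a value present at index t whose predecessors are smaller
  have hfirst : ∀ (t : Nat) (htn : t < n),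
      (∀ j (hj : j < n), j < t → l[j] < l[t]'htn) →
      l.countP (fun v => decide (v < l[t]'htn)) = t := by
    intro t htn hbelow
    have hiffw := fun j hj => countP_sorted_lt_iff l hs (l[t]'htn) j hj
    set t' := l.countP (fun v => decide (v < l[t]'htn)) with ht'
    have h1 : ¬ t < t' := fun h => absurd ((hiffw t htn).mpr h) (lt_irrefl _)
    have h2 : ¬ t' < t := by
      intro h
      have := (hiffw t' (by omega)).mp (hbelow t' (by omega) h)
      omega
    omega
  have hBL : pyBisectLeft l c = i := rfl
  by_cases hcm : c ∈ l
  · -- c occurs in l: both sides are the index of its first occurrence, i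
    obtain ⟨t, ht, hlc⟩ := List.mem_iff_getElem.mp hcm
    have hti : i ≤ t := by
      by_contra h
      exact absurd ((hiff t ht).mpr (by omega)) (by omega)
    have hin : i < n := lt_of_le_of_lt hti ht
    have hlic : l[i] = c := by
      refine le_antisymm (hlc ▸ hmono i t ht hti) ?_
      by_contra h
      exact absurd ((hiff i hin).mp (by omega)) (by omega)
    have hidx : PySem.List.index? l c = some i := by
      rw [PySem.List.index?_eq_some_iff]
      refine ⟨l.take i, l.drop (i + 1), ?_, ?_, ?_⟩
      · rw [← hlic, List.getElem_cons_drop hin, List.take_append_drop]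
      · rw [List.length_take]; omega
      · intro hmem
        obtain ⟨j, hj, hlj⟩ := List.mem_take_iff_getElem.mp hmem
        have : l[j] < c := (hiff j (by omega)).mpr (by omega)
        omega
    rw [if_pos hcm, hidx, hBL, if_neg (by omega : ¬ i = n)]
    by_cases hi0 : i = 0
    · rw [if_pos hi0]
      have h0n : 0 < n := by omega
      have hg0 : PySem.List.pyGetD l 0 0 = l[0]'h0n := by exact_mod_cast hget 0 h0n
      have : l[0]'h0n = c := by rw [← hlic]; congr 1; omega
      rw [hg0, this, hBL, hi0]
      rfl
    · rw [if_neg hi0]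
      have hi1n : i - 1 < n := by omega
      have hgl : PySem.List.pyGetD l ((i : Int) - 1) 0 = l[i - 1]'hi1n := by
        rw [show (i : Int) - 1 = ((i - 1 : Nat) : Int) by omega]
        exact hget (i - 1) hi1n
      have hgr : PySem.List.pyGetD l ((i : Int)) 0 = l[i]'hin := by
        exact_mod_cast hget i hin
      have hlt : l[i - 1]'hi1n < c := (hiff (i - 1) hi1n).mpr (by omega)
      rw [hgl, hgr, hlic, if_neg (by omega)]
      unfold pyBisectLeft
      rw [← hi]
      rfl
  · -- c does not occur in l
    have hne_c : ∀ j (hj : j < n), l[j] ≠ c := fun j hj h => hcm (h ▸ List.getElem_mem _)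
    have hbelow : ∀ j (hj : j < n), j < i → l[j] < c := fun j hj hji => (hiff j hj).mpr hji
    have habove : ∀ j (hj : j < n), i ≤ j → c < l[j] := by
      intro j hj hij
      have h1 : ¬ l[j] < c := fun h => by have := (hiff j hj).mp h; omega
      have := hne_c j hj
      omega
    rw [if_neg hcm, hBL]
    have habs_lt : ∀ x : Int, x < c → |x - c| = c - x := by
      intro x h; rw [abs_of_neg (by omega)]; ring
    have habs_gt : ∀ x : Int, c < x → |x - c| = x - c := fun x h => abs_of_pos (by omega)
    have hmin : ∀ (t : Nat) (htn : t < n),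
        (∀ (j : Nat) (hj : j < n), j < t → |l[t]'(hn ▸ htn) - c| < |l[j]'(hn ▸ hj) - c|) →
        (∀ (j : Nat) (hj : j < n), t ≤ j → |l[t]'(hn ▸ htn) - c| ≤ |l[j]'(hn ▸ hj) - c|) →
        (PySem.List.min? (PySem.List.pyRange 0 (n : Int) 1)
          (fun idx => |PySem.List.pyGetD l idx 0 - c|)).getD 0 = (t : Int) := by
      intro t htn H1 H2
      rw [min?_pyRange_first _ n t htn ?_ ?_]
      · rfl
      · intro j hj0 hjt
        have hjn : j.toNat < n := by omega
        have hje : PySem.List.pyGetD l j 0 = l[j.toNat]'(hn ▸ hjn) := by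
          rw [PySem.List.pyGetD_of_nonneg l 0 hj0, List.getD_eq_getElem]
        rw [hje, hget t htn]
        exact H1 j.toNat hjn (by omega)
      · intro j hjt hjn'
        have hj0 : (0 : Int) ≤ j := by omega
        have hjn : j.toNat < n := by omega
        have hje : PySem.List.pyGetD l j 0 = l[j.toNat]'(hn ▸ hjn) := by
          rw [PySem.List.pyGetD_of_nonneg l 0 hj0, List.getD_eq_getElem]
        rw [hje, hget t htn]
        exact H2 j.toNat hjn (by omega)
    by_cases hinn : i = n
    · -- everything is < c: both pick the first occurrence of the last value
      rw [if_pos hinn]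
      have h0n : 0 < n := List.length_pos_of_ne_nil hne
      have hw : PySem.List.pyGetD l ((n : Int) - 1) 0 = l[n - 1]'(by omega) := by
        rw [show (n : Int) - 1 = ((n - 1 : Nat) : Int) by omega]
        exact hget (n - 1) (by omega)
      set w := l[n - 1]'(by omega) with hwdef
      set t := l.countP (fun v => decide (v < w)) with ht
      have hiffw : ∀ j (hj : j < n), l[j] < w ↔ j < t := fun j hj => countP_sorted_lt_iff l hs w j hj
      have htn1 : t ≤ n - 1 := by
        by_contra h
        exact absurd ((hiffw (n - 1) (by omega)).mpr (by omega)) (by omega)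
      have htn : t < n := by omega
      have hlt : l[t]'htn = w := by
        refine le_antisymm (hmono t (n - 1) (by omega) htn1) ?_
        by_contra h
        exact absurd ((hiffw t htn).mp (by omega)) (by omega)
      have hwc : w < c := by rw [hwdef]; exact hbelow (n - 1) (by omega) (by omega)
      have := hmin t htn ?_ ?_
      · rw [this, hw]; rfl
      · intro j hj hjt
        have hjw : l[j] < w := (hiffw j hj).mpr hjt
        rw [habs_lt _ (hbelow j hj (by omega)), habs_lt _ (by omega)]
        rw [hlt]
        omega
      · intro j hj htj
        have hjw : l[j] ≤ w := hwdef ▸ hmono j (n - 1) (by omega) (by omega)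
        rw [habs_lt _ (hbelow j hj (by omega)), habs_lt _ (by omega), hlt]
        omega
    · rw [if_neg hinn]
      by_cases hi0 : i = 0
      · -- everything is ≥ c: both pick index 0
        rw [if_pos hi0]
        have h0n : 0 < n := by omega
        have hg0 : PySem.List.pyGetD l 0 0 = l[0]'h0n := by exact_mod_cast hget 0 h0n
        have hB0 : l.countP (fun v => decide (v < l[0]'h0n)) = 0 :=
          hfirst 0 h0n (by omega)
        have := hmin 0 h0n (by omega) ?_
        · rw [this, hg0]
          unfold pyBisectLeft
          rw [hB0]
        · intro j hj _
          have h0 : c < l[0]'h0n := habove 0 h0n (by omega)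
          have hjc : c < l[j] := habove j hj (by omega)
          rw [habs_gt _ h0, habs_gt _ hjc]
          have := hmono 0 j hj (by omega)
          omega
      · -- c falls strictly between l[i-1] and l[i]
        have hin : i < n := by omega
        have hi1n : i - 1 < n := by omega
        have hgl : PySem.List.pyGetD l ((i : Int) - 1) 0 = l[i - 1]'hi1n := by
          rw [show (i : Int) - 1 = ((i - 1 : Nat) : Int) by omega]
          exact hget (i - 1) hi1n
        have hgr : PySem.List.pyGetD l ((i : Int)) 0 = l[i]'hin := by
          exact_mod_cast hget i hin
        set left := l[i - 1]'hi1n with hleft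
        set right := l[i]'hin with hright
        have hlc : left < c := hleft ▸ hbelow (i - 1) hi1n (by omega)
        have hrc : c < right := hright ▸ habove i hin (by omega)
        rw [if_neg hi0, hgl, hgr]
        by_cases hd : c - left ≤ right - c
        · rw [if_pos hd]
          set t := l.countP (fun v => decide (v < left)) with ht
          have hiffl : ∀ j (hj : j < n), l[j] < left ↔ j < t := fun j hj => countP_sorted_lt_iff l hs left j hj
          have hti1 : t ≤ i - 1 := by
            by_contra h
            exact absurd ((hiffl (i - 1) hi1n).mpr (by omega)) (by omega)
          have htn : t < n := by omega
          have hlt : l[t]'htn = left := by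
            refine le_antisymm (hmono t (i - 1) hi1n hti1) ?_
            by_contra h
            exact absurd ((hiffl t htn).mp (by omega)) (by omega)
          have := hmin t htn ?_ ?_
          · rw [this]; rfl
          · intro j hj hjt
            have hjl : l[j] < left := (hiffl j hj).mpr hjt
            rw [habs_lt _ (by omega), habs_lt _ (by omega), hlt]
            omega
          · intro j hj htj
            rw [habs_lt _ (by omega), hlt]
            by_cases hji : j < i
            · have hjl : l[j] ≤ left := hleft ▸ hmono j (i - 1) hi1n (by omega)
              rw [habs_lt _ (hbelow j hj hji)]
              omega
            · have hjr : right ≤ l[j] := hright ▸ hmono i j hj (by omega)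
              rw [habs_gt _ (habove j hj (by omega))]
              omega
        · rw [if_neg hd]
          have hBr : l.countP (fun v => decide (v < right)) = i := by
            refine hfirst i hin ?_
            intro j hj hji
            calc l[j] < c := hbelow j hj hji
              _ < right := hrc
          have := hmin i hin ?_ ?_
          · rw [this]
            unfold pyBisectLeft
            rw [hBr]
          · intro j hj hji
            have hjl : l[j] ≤ left := hleft ▸ hmono j (i - 1) hi1n (by omega)
            rw [habs_gt _ hrc, habs_lt _ (hbelow j hj hji)]
            omega
          · intro j hj hij
            have hjr : right ≤ l[j] := hright ▸ hmono i j hj hij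
            rw [habs_gt _ hrc, habs_gt _ (habove j hj hij)]
            omega

-- ===== VERDICT (by name: the statement is the Claim_ definition above) =====
theorem centered_frame_window_spec : Claim_equal_centered_frame_window := by
  intro center available size _ hpre
  unfold Spec_centered_frame_window centered_frame_window centered_frame_window_alt
  have hsz : ¬ size ≤ 0 := by exact not_le.mpr hpre
  by_cases hav : available = []
  · simp [hav]
  · simp only [if_neg hsz, if_neg hav]
    have hs := PySem.List.sorted_pairwise available (fun x => x)
    have hne : PySem.List.sorted available (fun x => x) false ≠ [] := by
      simpa [PySem.List.sorted_eq_nil_iff] using hav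
    rw [idx_eq center (PySem.List.sorted available (fun x => x) false) hs hne]
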